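-- pv_equiv track=rewrite | github.com/jack0lantern/alcohol-label-checker | backend/app/api/routes_verify.py | _aggregate_field_results
-- ===== SOURCE A (Python) =====
-- _SINGLE_FALLBACK_FIELDS = ("brand_name", "class_type", "alcohol_content", "net_contents", "government_warning")
--
-- def _aggregate_field_results(
--     image_results: list[dict[str, object]],
-- ) -> dict[str, dict[str, str | None]]:
--     status_rank = {"pass": 2, "review_required": 1, "fail": 0}
--     aggregate: dict[str, dict[str, str | None]] = {}
--     for field_name in _SINGLE_FALLBACK_FIELDS:
--         best_result: dict[str, str | None] | None = None
--         best_rank = -1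
--         for image_result in image_results:
--             field_results = image_result.get("field_results")
--             if not isinstance(field_results, dict):
--                 continue
--             field_result = field_results.get(field_name)
--             if not isinstance(field_result, dict):
--                 continue
--             status = field_result.get("status")
--             if not isinstance(status, str):
--                 continue
--             current_rank = status_rank.get(status, -1)
--             if current_rank > best_rank:
--                 best_rank = current_rank
--                 best_result = {
--                     "expected_value": field_result.get("expected_value"),
--                     "extracted_value": field_result.get("extracted_value"),
--                     "status": status,
--                 }
--                 continue
--             if current_rank == best_rank and best_result is not None:
--                 if best_result.get("extracted_value") is None and field_result.get("extracted_value") is not None: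
--                     best_result = {
--                         "expected_value": field_result.get("expected_value"),
--                         "extracted_value": field_result.get("extracted_value"),
--                         "status": status,
--                     }
--
--         if best_result is not None:
--             aggregate[field_name] = best_result
--         else:
--             aggregate[field_name] = {
--                 "expected_value": None,
--                 "extracted_value": None,
--                 "status": "review_required",
--             }
--     return aggregate
-- ===== SOURCE B (Python) =====
-- _SINGLE_FALLBACK_FIELDS = ("brand_name", "class_type", "alcohol_content", "net_contents", "government_warning")
--
-- def _aggregate_field_results(
--     image_results: list[dict[str, object]],
-- ) -> dict[str, dict[str, str | None]]:
--     rank = {"pass": 2, "review_required": 1, "fail": 0}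
--     aggregate: dict[str, dict[str, str | None]] = {}
--     for field_name in _SINGLE_FALLBACK_FIELDS:
--         candidates = []
--         for image_result in image_results:
--             field_results = image_result.get("field_results")
--             if not isinstance(field_results, dict):
--                 continue
--             field_result = field_results.get(field_name)
--             if not isinstance(field_result, dict):
--                 continue
--             status = field_result.get("status")
--             if isinstance(status, str) and status in rank:
--                 candidates.append(field_result)
--         if not candidates:
--             aggregate[field_name] = {
--                 "expected_value": None,
--                 "extracted_value": None,
--                 "status": "review_required",
--             }
--             continue
--         top = max(rank[c.get("status")] for c in candidates)
--         best_group = [c for c in candidates if rank[c.get("status")] == top]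
--         chosen = next(
--             (c for c in best_group if c.get("extracted_value") is not None),
--             best_group[0],
--         )
--         aggregate[field_name] = {
--             "expected_value": chosen.get("expected_value"),
--             "extracted_value": chosen.get("extracted_value"),
--             "status": chosen.get("status"),
--         }
--     return aggregate
-- ===== Notes on version B (the rewrite author's own statement) =====
-- stated objective: simpler
-- what changed: A tracks a running (best_result, best_rank) state machine with an in-loop tie-break; B collects the valid candidate field_results per field, restricts to the max-rank group, and picks the first one with a non-None extracted_value (falling back to the group's first).
import Mathlib
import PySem

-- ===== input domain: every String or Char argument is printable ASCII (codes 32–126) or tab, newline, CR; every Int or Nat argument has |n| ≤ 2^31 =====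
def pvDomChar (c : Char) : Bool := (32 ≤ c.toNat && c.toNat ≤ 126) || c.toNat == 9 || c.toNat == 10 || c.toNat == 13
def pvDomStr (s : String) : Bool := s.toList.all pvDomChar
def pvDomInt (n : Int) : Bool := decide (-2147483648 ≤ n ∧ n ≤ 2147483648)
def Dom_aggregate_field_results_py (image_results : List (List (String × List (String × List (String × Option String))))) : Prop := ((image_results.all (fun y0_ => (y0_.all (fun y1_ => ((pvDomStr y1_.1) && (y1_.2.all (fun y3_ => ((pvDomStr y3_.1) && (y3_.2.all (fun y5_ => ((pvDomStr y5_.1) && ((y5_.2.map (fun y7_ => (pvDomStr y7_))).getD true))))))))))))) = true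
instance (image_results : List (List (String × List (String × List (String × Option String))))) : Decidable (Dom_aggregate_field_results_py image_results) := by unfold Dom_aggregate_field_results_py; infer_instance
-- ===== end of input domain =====

-- B replaces A's running best/rank state machine by collect-candidates, take the max-rank
-- group, pick the first with a non-None extracted value (objective: simpler selection logic).

-- shared helpers: first-match lookup on an association list (Python dict.get), the
-- status-rank dict and the field tuple, and `.get(k)` on a str|None dict (join collapses
-- "missing key" and "value is None", both of which Python's isinstance/`is None` checks treat alike)
def pvLookup {α : Type} (l : List (String × α)) (k : String) : Option α :=
  (PySem.Dict.mk l).get? k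
def pvJ (fr : List (String × Option String)) (k : String) : Option String :=
  (pvLookup fr k).join
def pvStatusRank : PySem.Dict String Int :=
  PySem.Dict.mk [("pass", 2), ("review_required", 1), ("fail", 0)]
def pvFields : List String :=
  ["brand_name", "class_type", "alcohol_content", "net_contents", "government_warning"]

-- ===== PORT A =====
-- A's fresh best_result dict {expected_value, extracted_value, status}
def pvMkA (fr : List (String × Option String)) (status : String) : List (String × Option String) :=
  [("expected_value", pvJ fr "expected_value"),
   ("extracted_value", pvJ fr "extracted_value"),
   ("status", some status)]

-- body of A's inner loop over image_results; state = (best_result, best_rank)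
def pvStepA (field_name : String)
    (st : Option (List (String × Option String)) × Int)
    (image_result : List (String × List (String × List (String × Option String)))) :
    Option (List (String × Option String)) × Int :=
  match pvLookup image_result "field_results" with
  | none => st
  | some field_results =>
    match pvLookup field_results field_name with
    | none => st
    | some field_result =>
      match (pvLookup field_result "status").join with
      | none => st
      | some status =>
        let current_rank := pvStatusRank.getD status (-1)
        if st.2 < current_rank then
          (some (pvMkA field_result status), current_rank)
        else if current_rank = st.2 then
          match st.1 with
          | none => st
          | some best_result =>
            if pvJ best_result "extracted_value" = none ∧ pvJ field_result "extracted_value" ≠ none then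
              (some (pvMkA field_result status), st.2)
            else st
        else st

-- body of A's outer loop over _SINGLE_FALLBACK_FIELDS
def pvLoopA (image_results : List (List (String × List (String × List (String × Option String)))))
    (aggregate : PySem.Dict String (List (String × Option String))) (field_name : String) :
    PySem.Dict String (List (String × Option String)) :=
  match (image_results.foldl (pvStepA field_name) (none, -1)).1 with
  | some best_result => aggregate.insert field_name best_result
  | none => aggregate.insert field_name
      [("expected_value", none), ("extracted_value", none), ("status", some "review_required")]

def aggregate_field_results_py (image_results : List (List (String × List (String × List (String × Option String))))) : List (String × List (String × Option String)) :=
  (pvFields.foldl (pvLoopA image_results) PySem.Dict.empty).items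

-- ===== PORT B =====
-- B: candidate field_result of one image_result (known status), else none
def pvCand (field_name : String)
    (image_result : List (String × List (String × List (String × Option String)))) :
    Option (List (String × Option String)) :=
  match pvLookup image_result "field_results" with
  | none => none
  | some field_results =>
    match pvLookup field_results field_name with
    | none => none
    | some field_result =>
      match (pvLookup field_result "status").join with
      | none => none
      | some status =>
        if (pvStatusRank.get? status).isSome then some field_result else none

-- rank[c.get("status")]; total — every candidate carries a known status string
def pvRk (c : List (String × Option String)) : Int :=
  pvStatusRank.getD ((pvJ c "status").getD "") (-1)

-- body of B's loop over _SINGLE_FALLBACK_FIELDS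
def pvLoopB (image_results : List (List (String × List (String × List (String × Option String)))))
    (aggregate : PySem.Dict String (List (String × Option String))) (field_name : String) :
    PySem.Dict String (List (String × Option String)) :=
  match image_results.filterMap (pvCand field_name) with
  | [] => aggregate.insert field_name
      [("expected_value", none), ("extracted_value", none), ("status", some "review_required")]
  | c0 :: rest =>
    let top := rest.foldl (fun m c => max m (pvRk c)) (pvRk c0)
    let best_group := (c0 :: rest).filter (fun c => pvRk c == top)
    let chosen := (best_group.find? (fun c => (pvJ c "extracted_value").isSome)).getD (best_group.headD [])
    aggregate.insert field_name
      [("expected_value", pvJ chosen "expected_value"),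
       ("extracted_value", pvJ chosen "extracted_value"),
       ("status", pvJ chosen "status")]

def aggregate_field_results_py_alt (image_results : List (List (String × List (String × List (String × Option String))))) : List (String × List (String × Option String)) :=
  (pvFields.foldl (pvLoopB image_results) PySem.Dict.empty).items

-- ===== PRECONDITION & SPEC =====
def Spec_aggregate_field_results_py (image_results : List (List (String × List (String × List (String × Option String))))) (out : List (String × List (String × Option String))) : Prop := out = aggregate_field_results_py_alt image_results
instance (image_results : List (List (String × List (String × List (String × Option String))))) (out : List (String × List (String × Option String))) : Decidable (Spec_aggregate_field_results_py image_results out) := by unfold Spec_aggregate_field_results_py; infer_instance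

-- ===== CLAIM (what is proved, stated in full; the proofs are below) =====
def Claim_equal_aggregate_field_results_py : Prop := ∀ (image_results : List (List (String × List (String × List (String × Option String))))), Dom_aggregate_field_results_py image_results → Spec_aggregate_field_results_py image_results (aggregate_field_results_py image_results)

-- ===== LEMMAS AND PROOFS =====

-- abstract versions of B's per-field selection, over a candidate list
def pvTop (cs : List (List (String × Option String))) : Int :=
  match cs with
  | [] => -1
  | c0 :: rest => rest.foldl (fun m c => max m (pvRk c)) (pvRk c0)

def pvGroup (cs : List (List (String × Option String))) : List (List (String × Option String)) :=
  cs.filter (fun c => pvRk c == pvTop cs)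

def pvChoose (cs : List (List (String × Option String))) : List (String × Option String) :=
  ((pvGroup cs).find? (fun c => (pvJ c "extracted_value").isSome)).getD ((pvGroup cs).headD [])

def pvMk (c : List (String × Option String)) : List (String × Option String) :=
  [("expected_value", pvJ c "expected_value"),
   ("extracted_value", pvJ c "extracted_value"),
   ("status", pvJ c "status")]

-- A's loop state, determined by the candidate prefix seen so far
def pvState (cs : List (List (String × Option String))) :
    Option (List (String × Option String)) × Int :=
  match cs with
  | [] => (none, -1)
  | _ :: _ => (some (pvMk (pvChoose cs)), pvTop cs)

theorem pvRank_values (s : String) (v : Int) (h : pvStatusRank.get? s = some v) : 0 ≤ v := by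
  simp [pvStatusRank, PySem.Dict.get?_mk_cons] at h
  split_ifs at h <;> [skip; skip; skip; simp [PySem.Dict.get?] at h] <;> injection h with h <;> omega

theorem pvRank_getD_nonneg_of_isSome {s : String} (hk : (pvStatusRank.get? s).isSome = true) :
    0 ≤ pvStatusRank.getD s (-1) := by
  cases hg : pvStatusRank.get? s with
  | none => rw [hg] at hk; simp at hk
  | some v => rw [PySem.Dict.getD_of_get?_eq_some _ _ hg]; exact pvRank_values s v hg

theorem pvRank_getD_ge_neg_one (s : String) : -1 ≤ pvStatusRank.getD s (-1) := by
  cases hg : pvStatusRank.get? s with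
  | none => rw [PySem.Dict.getD_of_get?_eq_none _ _ hg]
  | some v => rw [PySem.Dict.getD_of_get?_eq_some _ _ hg]; have := pvRank_values s v hg; omega

theorem pvRk_ge_neg_one (c : List (String × Option String)) : -1 ≤ pvRk c := pvRank_getD_ge_neg_one _

theorem pvRk_eq_rank {fr : List (String × Option String)} {s : String}
    (hst : pvJ fr "status" = some s) : pvRk fr = pvStatusRank.getD s (-1) := by
  rw [pvRk, hst]; rfl

theorem pvMkA_eq {fr : List (String × Option String)} {s : String}
    (hst : pvJ fr "status" = some s) : pvMkA fr s = pvMk fr := by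
  simp [pvMkA, pvMk, hst]

-- foldl max facts
theorem pvFoldMax_le (l : List (List (String × Option String))) (i : Int) :
    i ≤ l.foldl (fun m c => max m (pvRk c)) i := by
  induction l generalizing i with
  | nil => simp
  | cons c l ih => exact le_trans (le_max_left i (pvRk c)) (ih _)

theorem pvFoldMax_mem_le (l : List (List (String × Option String))) (i : Int)
    (c : List (String × Option String)) (h : c ∈ l) :
    pvRk c ≤ l.foldl (fun m c => max m (pvRk c)) i := by
  induction l generalizing i with
  | nil => simp at h
  | cons d l ih =>
    rcases List.mem_cons.1 h with rfl | h
    · exact le_trans (le_max_right i (pvRk c)) (pvFoldMax_le _ _)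
    · exact ih _ h

theorem pvFoldMax_attained (l : List (List (String × Option String))) (i : Int) :
    l.foldl (fun m c => max m (pvRk c)) i = i ∨
    ∃ c ∈ l, l.foldl (fun m c => max m (pvRk c)) i = pvRk c := by
  induction l generalizing i with
  | nil => simp
  | cons d l ih =>
    rcases ih (max i (pvRk d)) with h | ⟨c, hc, h⟩
    · rcases max_choice i (pvRk d) with hm | hm
      · left; simpa [hm] using h
      · right; exact ⟨d, List.mem_cons_self .., by simpa [hm] using h⟩
    · right; exact ⟨c, List.mem_cons_of_mem _ hc, h⟩

theorem pvLe_top (cs : List (List (String × Option String))) (c : List (String × Option String))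
    (h : c ∈ cs) : pvRk c ≤ pvTop cs := by
  match cs with
  | c0 :: rest =>
    rcases List.mem_cons.1 h with rfl | h
    · exact pvFoldMax_le rest (pvRk c)
    · exact pvFoldMax_mem_le rest _ c h

theorem pvTop_attained (c0 : List (String × Option String)) (rest : List (List (String × Option String))) :
    ∃ c ∈ c0 :: rest, pvRk c = pvTop (c0 :: rest) := by
  rcases pvFoldMax_attained rest (pvRk c0) with h | ⟨c, hc, h⟩
  · exact ⟨c0, List.mem_cons_self .., h.symm⟩
  · exact ⟨c, List.mem_cons_of_mem _ hc, h.symm⟩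

theorem pvTop_nonneg (c0 : List (String × Option String)) (rest : List (List (String × Option String)))
    (hcs : ∀ c ∈ c0 :: rest, 0 ≤ pvRk c) : 0 ≤ pvTop (c0 :: rest) := by
  obtain ⟨c, hc, h⟩ := pvTop_attained c0 rest
  exact h ▸ hcs c hc

theorem pvGroup_ne_nil (c0 : List (String × Option String)) (rest : List (List (String × Option String))) :
    pvGroup (c0 :: rest) ≠ [] := by
  obtain ⟨c, hc, h⟩ := pvTop_attained c0 rest
  have : c ∈ pvGroup (c0 :: rest) := List.mem_filter.2 ⟨hc, by simp [h]⟩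
  exact List.ne_nil_of_mem this

theorem pvTop_snoc (cs : List (List (String × Option String))) (c : List (String × Option String)) :
    pvTop (cs ++ [c]) = max (pvTop cs) (pvRk c) := by
  match cs with
  | [] => simp [pvTop, max_eq_right (pvRk_ge_neg_one c)]
  | c0 :: rest => simp [pvTop, List.foldl_append]

theorem pvChoose_snoc_gt (cs : List (List (String × Option String)))
    (c : List (String × Option String)) (hlt : pvTop cs < pvRk c) :
    pvChoose (cs ++ [c]) = c := by
  have htop : pvTop (cs ++ [c]) = pvRk c := by
    rw [pvTop_snoc]; exact max_eq_right (le_of_lt hlt)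
  have hnil : cs.filter (fun d => pvRk d == pvRk c) = [] := by
    rw [List.filter_eq_nil_iff]
    intro d hd
    have := pvLe_top cs d hd
    simp only [beq_iff_eq]
    omega
  have hgroup : pvGroup (cs ++ [c]) = [c] := by
    unfold pvGroup
    rw [htop, List.filter_append, hnil]
    simp
  unfold pvChoose
  rw [hgroup]
  cases hb : (pvJ c "extracted_value").isSome <;> simp [List.find?, hb]

theorem pvChoose_snoc_eq (cs : List (List (String × Option String)))
    (c : List (String × Option String)) (hne : cs ≠ []) (heq : pvRk c = pvTop cs) :
    pvChoose (cs ++ [c]) =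
      if pvJ (pvChoose cs) "extracted_value" = none ∧ pvJ c "extracted_value" ≠ none then c
      else pvChoose cs := by
  obtain ⟨c0, rest, rfl⟩ : ∃ c0 rest, cs = c0 :: rest := by
    cases cs with
    | nil => exact absurd rfl hne
    | cons c0 rest => exact ⟨c0, rest, rfl⟩
  have htop : pvTop ((c0 :: rest) ++ [c]) = pvTop (c0 :: rest) := by
    rw [pvTop_snoc]; exact max_eq_left (le_of_eq heq)
  have hgroup : pvGroup ((c0 :: rest) ++ [c]) = pvGroup (c0 :: rest) ++ [c] := by
    unfold pvGroup
    rw [htop, List.filter_append]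
    simp [heq]
  have hgne := pvGroup_ne_nil c0 rest
  obtain ⟨g0, gr, hg⟩ : ∃ g0 gr, pvGroup (c0 :: rest) = g0 :: gr := by
    cases hgg : pvGroup (c0 :: rest) with
    | nil => exact absurd hgg hgne
    | cons g0 gr => exact ⟨g0, gr, rfl⟩
  unfold pvChoose
  rw [hgroup, hg, List.find?_append]
  cases hf : (g0 :: gr).find? (fun d => (pvJ d "extracted_value").isSome) with
  | some d =>
    have hd : (pvJ d "extracted_value").isSome = true := by
      have := List.find?_some hf; simpa using this
    have hd' : pvJ d "extracted_value" ≠ none := by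
      intro hn; rw [hn] at hd; simp at hd
    simp [hd', Option.or]
  | none =>
    have hall : ∀ d ∈ g0 :: gr, (pvJ d "extracted_value").isSome = false := by
      intro d hd
      have := List.find?_eq_none.1 hf d hd; simpa using this
    have hhead : pvJ g0 "extracted_value" = none :=
      Option.not_isSome_iff_eq_none.1 (by simp [hall g0 (List.mem_cons_self ..)])
    cases hc : (pvJ c "extracted_value").isSome with
    | true =>
      have hc' : pvJ c "extracted_value" ≠ none := by
        intro hn; rw [hn] at hc; simp at hc
      simp [List.find?, hc, hhead, hc', Option.or]
    | false =>
      have hc' : pvJ c "extracted_value" = none := Option.not_isSome_iff_eq_none.1 (by simp [hc])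
      simp [List.find?, hc', Option.or]

theorem pvChoose_snoc_lt (cs : List (List (String × Option String)))
    (c : List (String × Option String)) (hlt : pvRk c < pvTop cs) :
    pvChoose (cs ++ [c]) = pvChoose cs ∧ pvTop (cs ++ [c]) = pvTop cs := by
  have htop : pvTop (cs ++ [c]) = pvTop cs := by
    rw [pvTop_snoc]; exact max_eq_left (le_of_lt hlt)
  have hgroup : pvGroup (cs ++ [c]) = pvGroup cs := by
    unfold pvGroup
    rw [htop, List.filter_append]
    have : pvRk c ≠ pvTop cs := ne_of_lt hlt
    simp [this]
  exact ⟨by unfold pvChoose; rw [hgroup], htop⟩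

theorem pvJ_pvMk_extr (c : List (String × Option String)) :
    pvJ (pvMk c) "extracted_value" = pvJ c "extracted_value" := by
  simp [pvJ, pvMk, pvLookup, PySem.Dict.get?_mk_cons]

theorem pvCand_nonneg {f : String} {x : List (String × List (String × List (String × Option String)))}
    {fr : List (String × Option String)} (h : pvCand f x = some fr) : 0 ≤ pvRk fr := by
  cases h1 : pvLookup x "field_results" with
  | none => simp [pvCand, h1] at h
  | some frs =>
    cases h2 : pvLookup frs f with
    | none => simp [pvCand, h1, h2] at h
    | some fr' =>
      cases h3 : (pvLookup fr' "status").join with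
      | none => simp [pvCand, h1, h2, h3] at h
      | some s =>
        by_cases h4 : (pvStatusRank.get? s).isSome = true
        · simp only [pvCand, h1, h2, h3, if_pos h4] at h
          injection h with h; subst h
          rw [pvRk_eq_rank (show pvJ fr' "status" = some s from h3)]
          exact pvRank_getD_nonneg_of_isSome h4
        · simp [pvCand, h1, h2, h3, h4] at h

theorem pvStep_none {f : String} {x : List (String × List (String × List (String × Option String)))}
    (h : pvCand f x = none) (cs : List (List (String × Option String)))
    (hcs : ∀ c ∈ cs, 0 ≤ pvRk c) :
    pvStepA f (pvState cs) x = pvState cs := by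
  cases h1 : pvLookup x "field_results" with
  | none => simp [pvStepA, h1]
  | some frs =>
    cases h2 : pvLookup frs f with
    | none => simp [pvStepA, h1, h2]
    | some fr =>
      cases h3 : (pvLookup fr "status").join with
      | none => simp [pvStepA, h1, h2, h3]
      | some s =>
        have h4 : pvStatusRank.get? s = none := by
          simpa [pvCand, h1, h2, h3] using h
        have hrank : pvStatusRank.getD s (-1) = -1 :=
          PySem.Dict.getD_of_get?_eq_none _ _ h4
        cases cs with
        | nil =>
          simp only [pvStepA, h1, h2, h3, hrank, pvState]
          norm_num
        | cons c0 rest =>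
          have h0 : 0 ≤ pvTop (c0 :: rest) := pvTop_nonneg c0 rest hcs
          simp only [pvStepA, h1, h2, h3, hrank, pvState]
          rw [if_neg (by omega), if_neg (by omega)]

theorem pvStep_cand {f : String} {x : List (String × List (String × List (String × Option String)))}
    {fr : List (String × Option String)} (h : pvCand f x = some fr)
    (cs : List (List (String × Option String))) (hcs : ∀ c ∈ cs, 0 ≤ pvRk c) :
    pvStepA f (pvState cs) x = pvState (cs ++ [fr]) := by
  have hr := pvCand_nonneg h
  cases h1 : pvLookup x "field_results" with
  | none => simp [pvCand, h1] at h
  | some frs =>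
    cases h2 : pvLookup frs f with
    | none => simp [pvCand, h1, h2] at h
    | some fr' =>
      cases h3 : (pvLookup fr' "status").join with
      | none => simp [pvCand, h1, h2, h3] at h
      | some s =>
        by_cases h4 : (pvStatusRank.get? s).isSome = true
        swap
        · simp [pvCand, h1, h2, h3, h4] at h
        simp only [pvCand, h1, h2, h3, if_pos h4] at h
        injection h with h; subst h
        have hst : pvJ fr' "status" = some s := h3
        have hrank : pvStatusRank.getD s (-1) = pvRk fr' := (pvRk_eq_rank hst).symm
        simp only [pvStepA, h1, h2, h3, hrank]
        cases cs with
        | nil =>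
          have hgt : (-1 : Int) < pvRk fr' := by omega
          simp only [pvState]
          rw [if_pos hgt]
          have hch := pvChoose_snoc_gt [] fr' (by simpa [pvTop] using hgt)
          have htop : pvTop ([] ++ [fr']) = pvRk fr' := by
            rw [pvTop_snoc]; simp [pvTop, max_eq_right (pvRk_ge_neg_one fr')]
          simp only [List.nil_append] at hch htop ⊢
          rw [pvMkA_eq hst]
          cases hcons : [fr'] with
          | nil => simp at hcons
          | cons d ds => simp only [← hcons, hch, htop]
        | cons c0 rest =>
          simp only [pvState]
          rcases lt_trichotomy (pvTop (c0 :: rest)) (pvRk fr') with hlt | heq | hgt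
          · rw [if_pos hlt]
            have hch := pvChoose_snoc_gt (c0 :: rest) fr' hlt
            have htop : pvTop ((c0 :: rest) ++ [fr']) = pvRk fr' := by
              rw [pvTop_snoc]; exact max_eq_right (le_of_lt hlt)
            cases hcons : (c0 :: rest) ++ [fr'] with
            | nil => simp at hcons
            | cons d ds =>
              rw [pvMkA_eq hst]
              simp only [← hcons, hch, htop]
          · rw [if_neg (by omega), if_pos (by omega)]
            have hch := pvChoose_snoc_eq (c0 :: rest) fr' (by simp) heq.symm
            have htop : pvTop ((c0 :: rest) ++ [fr']) = pvTop (c0 :: rest) := by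
              rw [pvTop_snoc]; omega
            cases hcons : (c0 :: rest) ++ [fr'] with
            | nil => simp at hcons
            | cons d ds =>
              simp only [← hcons, htop]
              rw [pvJ_pvMk_extr]
              by_cases hcond : pvJ (pvChoose (c0 :: rest)) "extracted_value" = none ∧
                  pvJ fr' "extracted_value" ≠ none
              · rw [if_pos hcond, hch, if_pos hcond, pvMkA_eq hst, heq]
              · rw [if_neg hcond, hch, if_neg hcond]
          · rw [if_neg (by omega), if_neg (by omega)]
            obtain ⟨hch, htop⟩ := pvChoose_snoc_lt (c0 :: rest) fr' hgt
            cases hcons : (c0 :: rest) ++ [fr'] with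
            | nil => simp at hcons
            | cons d ds =>
              simp only [← hcons, hch, htop]

theorem pvFold_eq (f : String) (xs : List (List (String × List (String × List (String × Option String)))))
    (cs : List (List (String × Option String))) (hcs : ∀ c ∈ cs, 0 ≤ pvRk c) :
    xs.foldl (pvStepA f) (pvState cs) = pvState (cs ++ xs.filterMap (pvCand f)) := by
  induction xs generalizing cs with
  | nil => simp
  | cons x xs ih =>
    rw [List.foldl_cons, List.filterMap_cons]
    cases h : pvCand f x with
    | none =>
      rw [pvStep_none h cs hcs]
      exact ih cs hcs
    | some fr =>
      rw [pvStep_cand h cs hcs]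
      have hcs' : ∀ c ∈ cs ++ [fr], 0 ≤ pvRk c := by
        intro c hc
        rcases List.mem_append.1 hc with hc | hc
        · exact hcs c hc
        · rw [List.mem_singleton.1 hc]; exact pvCand_nonneg h
      rw [ih (cs ++ [fr]) hcs']
      rw [List.append_assoc]
      rfl

theorem pvFold_nil (f : String) (xs : List (List (String × List (String × List (String × Option String))))) :
    xs.foldl (pvStepA f) (none, -1) = pvState (xs.filterMap (pvCand f)) := by
  have h := pvFold_eq f xs [] (by simp)
  simpa using h

theorem pvLoop_eq (xs : List (List (String × List (String × List (String × Option String)))))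
    (agg : PySem.Dict String (List (String × Option String))) (f : String) :
    pvLoopA xs agg f = pvLoopB xs agg f := by
  unfold pvLoopA pvLoopB
  rw [pvFold_nil]
  cases h : xs.filterMap (pvCand f) with
  | nil => rfl
  | cons c0 rest => rfl

-- ===== VERDICT (by name: the statement is the Claim_ definition above) =====
theorem aggregate_field_results_py_spec : Claim_equal_aggregate_field_results_py := by
  intro xs _
  unfold Spec_aggregate_field_results_py aggregate_field_results_py aggregate_field_results_py_alt
  rw [funext (fun agg => funext (fun f => pvLoop_eq xs agg f))]
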